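-- pv_equiv track=rewrite | github.com/Geo-fs/11Writer | app/server/src/services/analyst_workbench_service.py | _combined_source_mode
-- ===== SOURCE A (Python) =====
-- from typing import Literal, cast
--
-- def _combined_source_mode(
--     source_modes: list[Literal["fixture", "live", "unknown"]],
-- ) -> Literal["fixture", "live", "mixed", "unknown"]:
--     modes = {mode for mode in source_modes if mode != "unknown"}
--     if not modes:
--         return "unknown"
--     if len(modes) == 1:
--         return modes.pop()
--     return "mixed"
-- ===== SOURCE B (Python) =====
-- def _combined_source_mode(source_modes):
--     # Divide-and-conquer: combine halves under the semilattice join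
--     # ("unknown" is the identity, any conflict collapses to "mixed").
--     def join(a, b):
--         if a == "unknown":
--             return b
--         if b == "unknown":
--             return a
--         if a == b:
--             return a
--         return "mixed"
--
--     def go(xs):
--         if not xs:
--             return "unknown"
--         if len(xs) == 1:
--             return xs[0]
--         mid = len(xs) // 2
--         return join(go(xs[:mid]), go(xs[mid:]))
--
--     return go(source_modes)
-- ===== Notes on version B (the rewrite author's own statement) =====
-- stated objective: alternative
-- what changed: Replaces the build-a-dedup-set-then-test-its-size approach with a divide-and-conquer reduction: split the list in halves, combine each half recursively, and merge the two results with a 4-case semilattice join ('unknown' identity, conflict collapses to 'mixed').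
import Mathlib
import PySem

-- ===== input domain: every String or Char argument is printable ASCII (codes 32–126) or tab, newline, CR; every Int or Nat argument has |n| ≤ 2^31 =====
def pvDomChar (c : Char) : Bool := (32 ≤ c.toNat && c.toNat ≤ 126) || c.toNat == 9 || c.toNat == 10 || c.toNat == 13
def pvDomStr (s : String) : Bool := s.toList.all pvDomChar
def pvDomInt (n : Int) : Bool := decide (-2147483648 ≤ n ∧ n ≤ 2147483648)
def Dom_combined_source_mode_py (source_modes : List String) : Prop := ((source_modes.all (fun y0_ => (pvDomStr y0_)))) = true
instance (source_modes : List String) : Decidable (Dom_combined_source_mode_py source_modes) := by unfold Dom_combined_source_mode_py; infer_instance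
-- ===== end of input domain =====

-- B replaces A's build-a-dedup-set-then-test-its-size logic with a divide-and-conquer
-- reduction under a 4-case semilattice join (objective: alternative, same O(n) cost).

-- ===== PORT A =====
def combined_source_mode_py (source_modes : List String) : String :=
  let modes : PySem.Set String :=
    PySem.Set.ofList (source_modes.filter (fun mode => mode != "unknown"))
  if modes = [] then "unknown"
  else if modes.length = 1 then modes.headD ""  -- set.pop() on a 1-element set is its unique element
  else "mixed"

-- ===== PORT B =====
-- Source B's join: "unknown" is the identity, equal modes keep the mode, a conflict gives "mixed"
def csmJoin (a b : String) : String :=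
  if a = "unknown" then b
  else if b = "unknown" then a
  else if a = b then a
  else "mixed"

-- Source B's go: split at mid = len // 2, recurse on both halves, merge with join.
-- xs[:mid] / xs[mid:] with 0 ≤ mid ≤ len(xs) are exactly List.take / List.drop.
def csmGo (xs : List String) : String :=
  if xs = [] then "unknown"
  else if xs.length = 1 then xs.headD ""   -- xs[0] on a nonempty list
  else
    csmJoin (csmGo (xs.take (xs.length / 2))) (csmGo (xs.drop (xs.length / 2)))
termination_by xs.length
decreasing_by
  · have : xs.length ≥ 2 := by
      rcases xs with _ | ⟨a, _ | ⟨b, t⟩⟩ <;> simp_all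
    simp [List.length_take]; omega
  · have : xs.length ≥ 2 := by
      rcases xs with _ | ⟨a, _ | ⟨b, t⟩⟩ <;> simp_all
    simp [List.length_drop]; omega

def combined_source_mode_py_alt (source_modes : List String) : String :=
  csmGo source_modes

-- ===== PRECONDITION & SPEC =====
def Spec_combined_source_mode_py (source_modes : List String) (out : String) : Prop := out = combined_source_mode_py_alt source_modes
instance (source_modes : List String) (out : String) : Decidable (Spec_combined_source_mode_py source_modes out) := by unfold Spec_combined_source_mode_py; infer_instance

-- ===== CLAIM (what is proved, stated in full; the proofs are below) =====
def Claim_equal_combined_source_mode_py : Prop := ∀ (source_modes : List String), Dom_combined_source_mode_py source_modes → Spec_combined_source_mode_py source_modes (combined_source_mode_py source_modes)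

-- ===== LEMMAS AND PROOFS =====

theorem csmJoin_unknown_right (a : String) : csmJoin a "unknown" = a := by
  unfold csmJoin; split_ifs <;> simp_all

theorem csmJoin_unknown_left (b : String) : csmJoin "unknown" b = b := by
  simp [csmJoin]

theorem csmJoin_mixed_left (c : String) : csmJoin "mixed" c = "mixed" := by
  unfold csmJoin; split_ifs <;> simp_all

theorem csmJoin_mixed_right (a : String) (ha : a ≠ "unknown") :
    csmJoin a "mixed" = "mixed" := by
  unfold csmJoin; split_ifs <;> simp_all

theorem csmJoin_assoc (a b c : String) :
    csmJoin a (csmJoin b c) = csmJoin (csmJoin a b) c := by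
  by_cases ha : a = "unknown"
  · rw [ha, csmJoin_unknown_left, csmJoin_unknown_left]
  by_cases hb : b = "unknown"
  · rw [hb, csmJoin_unknown_left, csmJoin_unknown_right]
  by_cases hc : c = "unknown"
  · rw [hc, csmJoin_unknown_right, csmJoin_unknown_right]
  by_cases hbc : b = c
  · subst hbc
    have hbb : csmJoin b b = b := by simp [csmJoin, hb]
    by_cases hab : a = b
    · simp only [hab, hbb]
    · have : csmJoin a b = "mixed" := by simp [csmJoin, ha, hb, hab]
      rw [hbb, this, csmJoin_mixed_left]
  · have hjbc : csmJoin b c = "mixed" := by simp [csmJoin, hb, hc, hbc]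
    rw [hjbc, csmJoin_mixed_right a ha]
    by_cases hab : a = b
    · have : csmJoin a b = a := by simp [csmJoin, hab]
      rw [this]
      have hac : a ≠ c := fun h => hbc (hab ▸ h)
      simp [csmJoin, ha, hc, hac]
    · have : csmJoin a b = "mixed" := by simp [csmJoin, ha, hb, hab]
      rw [this, csmJoin_mixed_left]

-- the fold form of B: reducing the whole list left-to-right under join
def csmFold (xs : List String) : String := xs.foldl csmJoin "unknown"

theorem foldl_csmJoin_acc (xs : List String) :
    ∀ a : String, xs.foldl csmJoin a = csmJoin a (csmFold xs) := by
  induction xs with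
  | nil => intro a; simp [csmFold, csmJoin_unknown_right]
  | cons m rest ih =>
    intro a
    simp only [csmFold, List.foldl_cons]
    rw [ih (csmJoin a m), ih (csmJoin "unknown" m), csmJoin_assoc]
    have : csmJoin "unknown" m = m := by simp [csmJoin]
    rw [this]

theorem csmFold_append (l r : List String) :
    csmFold (l ++ r) = csmJoin (csmFold l) (csmFold r) := by
  simp only [csmFold, List.foldl_append]
  exact foldl_csmJoin_acc r _

-- B's divide-and-conquer computes exactly the left fold under join
theorem csmGo_eq_fold_aux (n : Nat) : ∀ xs : List String, xs.length ≤ n → csmGo xs = csmFold xs := by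
  induction n with
  | zero =>
    intro xs h
    have hx : xs = [] := List.length_eq_zero_iff.mp (Nat.le_zero.mp h)
    subst hx
    rw [csmGo.eq_def]; simp [csmFold]
  | succ n ih =>
    intro xs h
    rw [csmGo.eq_def]
    split_ifs with h0 h1
    · simp [h0, csmFold]
    · rcases xs with _ | ⟨m, t⟩
      · simp at h0
      · have ht : t = [] := List.length_eq_zero_iff.mp (by simpa using h1)
        subst ht
        simp [csmFold, csmJoin_unknown_left]
    · have hlen : 2 ≤ xs.length := by
        rcases xs with _ | ⟨a, _ | ⟨b, t⟩⟩ <;> simp_all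
      rw [ih _ (by simp [List.length_take]; omega),
          ih _ (by simp [List.length_drop]; omega),
          ← csmFold_append, List.take_append_drop]

theorem csmGo_eq_fold (xs : List String) : csmGo xs = csmFold xs :=
  csmGo_eq_fold_aux xs.length xs le_rfl

-- skipping "unknown" entries = folding the filtered list
theorem csmFold_filter (xs : List String) :
    csmFold xs = csmFold (xs.filter (fun m => m != "unknown")) := by
  induction xs with
  | nil => rfl
  | cons m rest ih =>
    by_cases hm : m = "unknown"
    · have h1 : csmJoin "unknown" m = "unknown" := by simp [csmJoin, hm]
      simp only [csmFold, List.foldl_cons, List.filter_cons, hm]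
      simpa [csmFold] using ih
    · simp only [csmFold, List.foldl_cons, List.filter_cons, bne_iff_ne, ne_eq, hm,
        not_false_eq_true, if_pos]
      rw [foldl_csmJoin_acc, foldl_csmJoin_acc]
      simpa [csmFold] using congrArg (csmJoin (csmJoin "unknown" m)) ih

-- "mixed" is absorbing for the fold
theorem csmFold_mixed (xs : List String) : xs.foldl csmJoin "mixed" = "mixed" := by
  induction xs with
  | nil => rfl
  | cons m rest ih =>
    simpa [csmJoin_mixed_left] using ih

-- on a list of real modes, the fold keeps the first mode unless a conflict appears
theorem csmFold_run (y : String) (hy : y ≠ "unknown") (ys : List String)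
    (hys : ∀ m ∈ ys, m ≠ "unknown") :
    csmFold (y :: ys) = if ys.all (· == y) then y else "mixed" := by
  have h0 : csmJoin "unknown" y = y := by simp [csmJoin]
  simp only [csmFold, List.foldl_cons, h0]
  induction ys with
  | nil => simp
  | cons m rest ih =>
    have hm : m ≠ "unknown" := hys m (by simp)
    have hr : ∀ m ∈ rest, m ≠ "unknown" := fun m hmem => hys m (by simp [hmem])
    by_cases hd : m = y
    · have hyy : csmJoin y y = y := by simp [csmJoin, hy]
      simpa [hd, hyy] using ih hr
    · have : csmJoin y m = "mixed" := by simp [csmJoin, hy, hm, Ne.symm hd]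
      simp [this, hd, csmFold_mixed]

-- foldl Set.add only appends to its accumulator
theorem foldl_add_prefix (rest : List String) :
    ∀ s : List String, ∃ t, rest.foldl PySem.Set.add s = s ++ t := by
  induction rest with
  | nil => intro s; exact ⟨[], by simp⟩
  | cons m rest' ih =>
    intro s
    by_cases hmem : m ∈ s
    · obtain ⟨t, ht⟩ := ih s
      exact ⟨t, by rw [List.foldl_cons, PySem.Set.add_of_mem hmem, ht]⟩
    · obtain ⟨t, ht⟩ := ih (s ++ [m])
      exact ⟨m :: t, by rw [List.foldl_cons, PySem.Set.add_of_not_mem hmem, ht]; simp⟩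

-- adding only elements already present leaves the set unchanged
theorem foldl_add_of_mem (rest : List String) :
    ∀ s : List String, (∀ m ∈ rest, m ∈ s) → rest.foldl PySem.Set.add s = s := by
  induction rest with
  | nil => intro s _; rfl
  | cons m rest' ih =>
    intro s h
    have hm : m ∈ s := h m (by simp)
    rw [List.foldl_cons, PySem.Set.add_of_mem hm]
    exact ih s (fun m hmem => h m (by simp [hmem]))

-- A's set-size test characterised on the filtered source list
theorem portA_cons (x : String) (rest : List String) :
    combined_source_mode_py (x :: rest)
      = (if (x :: rest).filter (fun m => m != "unknown") = [] then "unknown"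
         else if ((x :: rest).filter (fun m => m != "unknown")).all
                (· == ((x :: rest).filter (fun m => m != "unknown")).headD "") then
               ((x :: rest).filter (fun m => m != "unknown")).headD ""
         else "mixed") := by
  simp only [combined_source_mode_py]
  cases hl : (x :: rest).filter (fun m => m != "unknown") with
  | nil => simp [PySem.Set.ofList]
  | cons y ys =>
    have hfold : PySem.Set.ofList (y :: ys) = (y :: ys).foldl PySem.Set.add [] :=
      PySem.Set.ofList_eq_foldl _
    obtain ⟨t, ht⟩ := foldl_add_prefix ys [y]
    have hset : PySem.Set.ofList (y :: ys) = y :: t := by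
      rw [hfold, List.foldl_cons]
      have : PySem.Set.add [] y = [y] := rfl
      rw [this, ht]; rfl
    by_cases hall : ys.all (· == y)
    · have hsingle : PySem.Set.ofList (y :: ys) = [y] := by
        rw [hfold, List.foldl_cons]
        have : PySem.Set.add [] y = [y] := rfl
        rw [this]
        exact foldl_add_of_mem ys [y]
          (fun m hm => by
            have := List.all_eq_true.mp hall m hm
            simp only [beq_iff_eq] at this
            simp [this])
      simp [hsingle, hall]
    · have hne2 : t ≠ [] := by
        intro ht0
        apply hall
        rw [List.all_eq_true]
        intro m hm
        have : m ∈ PySem.Set.ofList (y :: ys) := by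
          rw [PySem.Set.mem_ofList]; simp [hm]
        rw [hset, ht0] at this
        simpa using this
      have hlen : (PySem.Set.ofList (y :: ys)).length ≠ 1 := by
        rw [hset]
        simp only [List.length_cons, ne_eq, Nat.add_eq_right]
        exact fun h0 => hne2 (List.length_eq_zero_iff.mp h0)
      simp [hset, hne2, hall]

-- ===== VERDICT (by name: the statement is the Claim_ definition above) =====
theorem combined_source_mode_py_spec : Claim_equal_combined_source_mode_py := by
  intro sm _
  unfold Spec_combined_source_mode_py combined_source_mode_py_alt
  rw [csmGo_eq_fold, csmFold_filter]
  have hfl : ∀ m ∈ sm.filter (fun m => m != "unknown"), m ≠ "unknown" := by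
    intro m hm
    have := List.of_mem_filter hm
    simpa using this
  cases sm with
  | nil => rfl
  | cons x rest =>
    rw [portA_cons]
    cases hl : (x :: rest).filter (fun m => m != "unknown") with
    | nil => simp [csmFold]
    | cons y ys =>
      rw [hl] at hfl
      have hy : y ≠ "unknown" := hfl y (by simp)
      have hys : ∀ m ∈ ys, m ≠ "unknown" := fun m hm => hfl m (by simp [hm])
      rw [csmFold_run y hy ys hys]
      simp
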